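-- pv_equiv track=rewrite | github.com/LivKandlaker/practice-scripts-in-python | Q12 - Minimum value Not in Array.py | solution
-- ===== SOURCE A (Python) =====
-- def solution(A):
--     N = dict()
--
--     for i in range(len(A)):
--         N[A[i]] = i
--
--
--     for i in range(len(A)):
--         if i not in N.keys():
--             return i
--         else:
--             i+1
--
--
--     return
-- ===== SOURCE B (Python) =====
-- def solution(A):
--     missing = set(range(len(A))) - set(A)
--     return min(missing, default=None)
-- ===== Notes on version B (the rewrite author's own statement) =====
-- stated objective: simpler
-- what changed: B replaces A's dict-building pass plus ordered index scan with early return by a set difference (indices minus values) whose minimum is returned with default=None.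
import Mathlib
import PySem

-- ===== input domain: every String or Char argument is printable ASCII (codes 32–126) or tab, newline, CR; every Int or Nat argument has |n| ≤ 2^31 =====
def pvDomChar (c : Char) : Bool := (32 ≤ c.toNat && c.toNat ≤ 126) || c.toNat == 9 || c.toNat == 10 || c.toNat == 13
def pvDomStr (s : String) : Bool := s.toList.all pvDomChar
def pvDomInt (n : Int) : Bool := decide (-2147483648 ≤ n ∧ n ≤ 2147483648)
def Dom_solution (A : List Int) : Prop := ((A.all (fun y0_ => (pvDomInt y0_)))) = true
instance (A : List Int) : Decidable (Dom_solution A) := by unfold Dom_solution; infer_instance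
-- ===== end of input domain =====

-- B replaces A's dict-building pass plus ordered membership scan with early return
-- by a set difference (indices minus values) followed by min with default None (simpler).

-- ===== PORT A =====
def solution (A : List Int) : Option Int :=
  let N : PySem.Dict Int Int :=
    (PySem.List.pyRange 0 (PySem.List.len A)).foldl
      (fun d i => d.insert (PySem.List.pyGetD A i 0) i) PySem.Dict.empty
  (PySem.List.pyRange 0 (PySem.List.len A)).findSome?
    (fun i => if !(N.keys.contains i) then some i else none)

-- ===== PORT B =====
def solution_alt (A : List Int) : Option Int :=
  let missing : PySem.Set Int :=
    PySem.Set.diff (PySem.Set.ofList (PySem.List.pyRange 0 (PySem.List.len A)))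
      (PySem.Set.ofList A)
  PySem.List.min? missing (fun x => x)

-- ===== PRECONDITION & SPEC =====
def Spec_solution (A : List Int) (out : Option Int) : Prop := out = solution_alt A
instance (A : List Int) (out : Option Int) : Decidable (Spec_solution A out) := by unfold Spec_solution; infer_instance

-- ===== CLAIM (what is proved, stated in full; the proofs are below) =====
def Claim_equal_solution : Prop := ∀ (A : List Int), Dom_solution A → Spec_solution A (solution A)

-- ===== LEMMAS AND PROOFS =====

-- A first-hit scan returning the index itself is the head of the filtered list.
theorem findSome?_ite_eq_filter_head {α : Type} (l : List α) (q : α → Bool) :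
    (l.findSome? (fun i => if q i then some i else none)) = (l.filter q).head? := by
  induction l with
  | nil => rfl
  | cons x t ih =>
    by_cases h : q x = true
    · simp [List.findSome?, List.filter, h]
    · simp [List.findSome?, List.filter, h, ih]

theorem foldl_min_of_le {α : Type} [LinearOrder α] (t : List α) (x : α)
    (h : ∀ y ∈ t, x ≤ y) : t.foldl min x = x := by
  induction t with
  | nil => rfl
  | cons y t ih =>
    have hx : min x y = x := min_eq_left (h y (by simp))
    simp only [List.foldl, hx]
    exact ih (fun z hz => h z (by simp [hz]))

-- min with no key of a strictly increasing list is its head.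
theorem min?_of_pairwise_lt (l : List Int) (h : l.Pairwise (· < ·)) :
    PySem.List.min? l (fun y => y) = l.head? := by
  cases l with
  | nil => rfl
  | cons x t =>
    rw [PySem.List.min?_id_cons]
    have hx : ∀ y ∈ t, x ≤ y := fun y hy => le_of_lt ((List.pairwise_cons.mp h).1 y hy)
    simp [foldl_min_of_le t x hx]

theorem keys_of_A (A : List Int) :
    ((PySem.List.pyRange 0 (PySem.List.len A)).foldl
      (fun (d : PySem.Dict Int Int) i => d.insert (PySem.List.pyGetD A i 0) i)
      PySem.Dict.empty).keys = PySem.Set.ofList A := by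
  rw [PySem.Dict.keys_foldl_insert_key]
  rw [PySem.List.map_pyGetD_pyRange_zero]
  simp [PySem.Dict.keys_empty, PySem.Set.update_nil_left]

-- ===== VERDICT (by name: the statement is the Claim_ definition above) =====
theorem solution_spec : Claim_equal_solution := by
  intro A _
  show solution A = solution_alt A
  unfold solution solution_alt
  dsimp only
  rw [keys_of_A]
  rw [PySem.Set.ofList_eq_self_of_nodup _ (PySem.List.nodup_pyRange_one 0 (PySem.List.len A))]
  rw [findSome?_ite_eq_filter_head]
  rw [show PySem.Set.diff (PySem.List.pyRange 0 (PySem.List.len A)) (PySem.Set.ofList A)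
      = (PySem.List.pyRange 0 (PySem.List.len A)).filter
          (fun i => !(PySem.Set.ofList A).contains i) from rfl]
  rw [min?_of_pairwise_lt _
    (List.Pairwise.filter _ (PySem.List.pairwise_lt_pyRange_one 0 (PySem.List.len A)))]
  simp [PySem.Set.contains_eq_listContains]
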